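-- pv_equiv track=rewrite | github.com/DMontgomery40/qEEG-analysis | scripts/generate_patient_facing_writeups.py | _pick_model_id
-- ===== SOURCE A (Python) =====
-- def _pick_model_id(preferred: str, discovered: list[str]) -> str:
--     pref = (preferred or "").strip()
--     if not pref:
--         raise ValueError("Model id is empty")
--
--     # Exact match first.
--     if pref in discovered:
--         return pref
--
--     # Case-insensitive exact match.
--     pref_lower = pref.lower()
--     for mid in discovered:
--         if mid.lower() == pref_lower:
--             return mid
--
--     # Substring match (prefer non-preview variants if both exist).
--     matches = [mid for mid in discovered if pref_lower in mid.lower()]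
--     if not matches:
--         raise ValueError(f"Model '{pref}' not found in /v1/models")
--
--     def rank(mid: str) -> tuple[int, int, str]:
--         lower = mid.lower()
--         preview_penalty = 1 if "preview" in lower else 0
--         # Prefer newer dated variants if present (YYYYMMDD suffix)
--         date_bonus = 0
--         parts = lower.split("-")
--         if parts and parts[-1].isdigit() and len(parts[-1]) >= 6:
--             date_bonus = -int(parts[-1][-6:])  # reverse sort: larger dates win
--         return (preview_penalty, date_bonus, len(mid), mid)
--
--     return sorted(matches, key=rank)[0]
-- ===== SOURCE B (Python) =====
-- def _key(mid: str, pref: str, pref_lower: str):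
--     # Uniform composite score: one ordered key per candidate, or None if it
--     # does not qualify at all.  Tier 0 = exact, 1 = case-insensitive exact,
--     # 2 = substring (ranked by preview penalty, date bonus, length, name).
--     low = mid.lower()
--     if mid == pref:
--         return (0, 0, 0, 0, "")
--     if low == pref_lower:
--         return (1, 0, 0, 0, "")
--     if pref_lower in low:
--         preview_penalty = 1 if "preview" in low else 0
--         date_bonus = 0
--         parts = low.split("-")
--         if parts[-1].isdigit() and len(parts[-1]) >= 6:
--             date_bonus = -int(parts[-1][-6:])
--         return (2, preview_penalty, date_bonus, len(mid), mid)
--     return None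
--
--
-- def _pick_model_id(preferred: str, discovered: list[str]) -> str:
--     # Score every candidate once with a single composite key and take one
--     # global min; no staged scans, no early returns, no sort.
--     pref = (preferred or "").strip()
--     if not pref:
--         raise ValueError("Model id is empty")
--
--     pref_lower = pref.lower()
--     scored = [(k, mid) for mid in discovered
--               for k in [_key(mid, pref, pref_lower)] if k is not None]
--     if not scored:
--         raise ValueError(f"Model '{pref}' not found in /v1/models")
--     return min(scored, key=lambda e: e[0])[1]
-- ===== Notes on version B (the rewrite author's own statement) =====
-- stated objective: alternative
-- what changed: A's three staged scans (exact membership, case-insensitive loop, substring filter) plus a full sort are replaced by uniform scoring: every candidate gets one composite key (tier, preview penalty, date bonus, length, name) in a single comprehension and one global min over the scored list picks the answer.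
import Mathlib
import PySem

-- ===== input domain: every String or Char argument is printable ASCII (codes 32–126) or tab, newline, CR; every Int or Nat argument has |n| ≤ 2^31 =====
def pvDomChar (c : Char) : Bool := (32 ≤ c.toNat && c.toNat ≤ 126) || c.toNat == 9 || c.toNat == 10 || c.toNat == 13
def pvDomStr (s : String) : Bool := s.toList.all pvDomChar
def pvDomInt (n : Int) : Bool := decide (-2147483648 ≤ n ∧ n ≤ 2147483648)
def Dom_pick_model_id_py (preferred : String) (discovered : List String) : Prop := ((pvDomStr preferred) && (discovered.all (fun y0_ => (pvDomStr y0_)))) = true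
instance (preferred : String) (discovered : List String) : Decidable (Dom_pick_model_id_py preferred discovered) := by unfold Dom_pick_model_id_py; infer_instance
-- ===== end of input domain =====

-- B replaces A's three staged scans plus a sort by uniform scoring: every candidate gets one
-- composite key (tier, preview, date, length, name) in a single pass and one global min picks
-- the answer (equal return values; neither program mutates its arguments).

-- the inner `rank` function of A (B's tier-2 key embeds the same four components)
def rank4 (mid : String) : Int × Int × Int × String :=
  let lower := PySem.Str.lower mid
  let preview_penalty : Int := if PySem.Str.isIn "preview" lower then 1 else 0
  let parts := (PySem.Str.split? lower "-").getD []   -- exact: sep "-" ≠ "" so split? = some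
  let date_bonus : Int :=
    if parts ≠ [] then
      match PySem.List.pyGet? parts (-1) with
      | some p =>
        if PySem.Str.strIsdigit p && decide (6 ≤ p.length) then
          -- exact: isdigit guarantees int() parses, so getD 0 is never the default
          -((PySem.Int.ofStr? (PySem.Str.slice p (some (-6)) none)).getD 0)
        else 0
      | none => 0
    else 0
  (preview_penalty, date_bonus, (mid.length : Int), mid)

-- Python's `<` on rank's 4-tuple (int, int, int, str), as an explicit Bool comparison
def rankLt (a b : Int × Int × Int × String) : Bool :=
  decide (a.1 < b.1) ||
    (decide (a.1 = b.1) &&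
      (decide (a.2.1 < b.2.1) ||
        (decide (a.2.1 = b.2.1) &&
          (decide (a.2.2.1 < b.2.2.1) ||
            (decide (a.2.2.1 = b.2.2.1) && decide (a.2.2.2 < b.2.2.2))))))

-- ===== PORT A =====
def pick_model_id_py (preferred : String) (discovered : List String) : String :=
  let pref := PySem.Str.strip preferred
  if pref = "" then ""          -- Python raises ValueError here; excluded by Pre_
  else if discovered.contains pref then pref
  else
    let pref_lower := PySem.Str.lower pref
    match discovered.find? (fun mid => PySem.Str.lower mid == pref_lower) with
    | some mid => mid
    | none =>
      let hits := discovered.filter (fun mid => PySem.Str.isIn pref_lower (PySem.Str.lower mid))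
      -- sorted(hits, key=rank): PySem.List.sorted with the tuple key, written out via its
      -- unfolding PySem.List.sorted_eq_foldl_insertBy (rankLt IS Python's `<` on rank tuples)
      match hits.foldl (fun acc x => PySem.List.insertBy (fun a b => rankLt (rank4 a) (rank4 b)) x acc) [] with
      | m :: _ => m
      | [] => ""                -- Python raises ValueError here; excluded by Pre_

-- ===== PORT B =====
-- Python's `<` on B's composite 5-tuple key (int, int, int, int, str)
def keyLt (a b : Int × Int × Int × Int × String) : Bool :=
  decide (a.1 < b.1) ||
    (decide (a.1 = b.1) &&
      (decide (a.2.1 < b.2.1) ||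
        (decide (a.2.1 = b.2.1) &&
          (decide (a.2.2.1 < b.2.2.1) ||
            (decide (a.2.2.1 = b.2.2.1) &&
              (decide (a.2.2.2.1 < b.2.2.2.1) ||
                (decide (a.2.2.2.1 = b.2.2.2.1) && decide (a.2.2.2.2 < b.2.2.2.2))))))))

-- B's `_key`: the composite score of one candidate, none if it does not qualify
def keyOf (pref pref_lower mid : String) : Option ((Int × Int × Int × Int × String) × String) :=
  let low := PySem.Str.lower mid
  if mid == pref then some ((0, 0, 0, 0, ""), mid)
  else if low == pref_lower then some ((1, 0, 0, 0, ""), mid)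
  else if PySem.Str.isIn pref_lower low then
    let r := rank4 mid
    some ((2, r.1, r.2.1, r.2.2.1, r.2.2.2), mid)
  else none

-- min's accumulator step (first-minimal, exactly Python's min), shared by port B and the lemmas
def minStep {α : Type} (before : α → α → Bool) (m : Option α) (x : α) : Option α :=
  match m with
  | none => some x
  | some m => if before x m then some x else some m

def pick_model_id_py_alt (preferred : String) (discovered : List String) : String :=
  let pref := PySem.Str.strip preferred
  if pref = "" then ""          -- Python raises ValueError here; excluded by Pre_
  else
    let pref_lower := PySem.Str.lower pref
    -- the scored comprehension: one composite key per qualifying candidate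
    let scored := discovered.filterMap (fun mid => keyOf pref pref_lower mid)
    -- min(scored, key=e[0]): Python's first-minimal min, written as its defining foldl
    match scored.foldl (minStep (fun a b => keyLt a.1 b.1)) none with
    | some m => m.2
    | none => ""                -- Python raises ValueError here; excluded by Pre_

-- ===== PRECONDITION & SPEC =====
-- Pre_ excludes exactly the inputs on which A raises ValueError: a preferred id that is
-- empty after stripping, or a list with no (case-insensitive) substring match for it.
def Pre_pick_model_id_py (preferred : String) (discovered : List String) : Prop :=
  PySem.Str.strip preferred ≠ "" ∧
  discovered.any (fun mid =>
    PySem.Str.isIn (PySem.Str.lower (PySem.Str.strip preferred)) (PySem.Str.lower mid)) = true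
instance (preferred : String) (discovered : List String) : Decidable (Pre_pick_model_id_py preferred discovered) := by unfold Pre_pick_model_id_py; infer_instance

def pvWitness_pick_model_id_py : String × List String := ("GPT-4o", ["gpt-4o-preview", "gpt-4o-20240806"])

def Spec_pick_model_id_py (preferred : String) (discovered : List String) (out : String) : Prop := out = pick_model_id_py_alt preferred discovered
instance (preferred : String) (discovered : List String) (out : String) : Decidable (Spec_pick_model_id_py preferred discovered out) := by unfold Spec_pick_model_id_py; infer_instance

-- ===== CLAIM (what is proved, stated in full; the proofs are below) =====
def Claim_equal_pick_model_id_py : Prop := ∀ (preferred : String) (discovered : List String), Dom_pick_model_id_py preferred discovered → Pre_pick_model_id_py preferred discovered → Spec_pick_model_id_py preferred discovered (pick_model_id_py preferred discovered)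

-- ===== LEMMAS AND PROOFS =====

-- generic facts about the first-minimal fold --------------------------------------------------

theorem foldl_minStep_keep {α : Type} (lt : α → α → Bool) (m : α) :
    ∀ l : List α, (∀ y ∈ l, lt y m = false) → l.foldl (minStep lt) (some m) = some m := by
  intro l
  induction l with
  | nil => intro _; rfl
  | cons x t ih =>
    intro h
    simp only [List.foldl_cons, minStep, h x (by simp), if_false]
    exact ih (fun y hy => h y (by simp [hy]))

theorem foldl_minStep_acc_lt {α : Type} (lt : α → α → Bool) (m : α) (l2 : List α)
    (h2 : ∀ y ∈ l2, lt y m = false) :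
    ∀ (l : List α) (a : α), lt m a = true → (∀ y ∈ l, lt m y = true) →
      (l ++ m :: l2).foldl (minStep lt) (some a) = some m := by
  intro l
  induction l with
  | nil =>
    intro a ha _
    simp only [List.nil_append, List.foldl_cons, minStep, ha, if_true]
    exact foldl_minStep_keep lt m l2 h2
  | cons y t ih =>
    intro a ha h1
    simp only [List.cons_append, List.foldl_cons, minStep]
    by_cases hy : lt y a = true
    · rw [if_pos hy]; exact ih y (h1 y (by simp)) (fun z hz => h1 z (by simp [hz]))
    · rw [if_neg hy]; exact ih a ha (fun z hz => h1 z (by simp [hz]))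

theorem foldl_minStep_split {α : Type} (lt : α → α → Bool) (l1 l2 : List α) (m : α)
    (h1 : ∀ y ∈ l1, lt m y = true) (hm : lt m m = false) (h2 : ∀ y ∈ l2, lt y m = false) :
    (l1 ++ m :: l2).foldl (minStep lt) none = some m := by
  cases l1 with
  | nil =>
    simp only [List.nil_append, List.foldl_cons, minStep]
    exact foldl_minStep_keep lt m l2 h2
  | cons x t =>
    simp only [List.cons_append, List.foldl_cons, minStep]
    exact foldl_minStep_acc_lt lt m l2 h2 t x (h1 x (by simp))
      (fun z hz => h1 z (by simp [hz]))

theorem foldl_minStep_some_ne_none {α : Type} (lt : α → α → Bool) :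
    ∀ (l : List α) (a : α), l.foldl (minStep lt) (some a) ≠ none := by
  intro l
  induction l with
  | nil => intro a h; simp at h
  | cons x t ih =>
    intro a
    simp only [List.foldl_cons, minStep]
    by_cases hx : lt x a = true
    · rw [if_pos hx]; exact ih x
    · rw [if_neg hx]; exact ih a

theorem foldl_minStep_ne_none {α : Type} (lt : α → α → Bool) (l : List α) (h : l ≠ []) :
    l.foldl (minStep lt) none ≠ none := by
  cases l with
  | nil => exact absurd rfl h
  | cons x t =>
    simp only [List.foldl_cons, minStep]
    exact foldl_minStep_some_ne_none lt t x

-- the fold commutes with mapping through a comparator-preserving embedding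
theorem foldl_minStep_map {α β : Type} (f : α → β) (la : α → α → Bool) (lb : β → β → Bool)
    (h : ∀ a b, lb (f a) (f b) = la a b) :
    ∀ (l : List α) (acc : Option α),
      (l.map f).foldl (minStep lb) (acc.map f) = (l.foldl (minStep la) acc).map f := by
  intro l
  induction l with
  | nil => intro acc; rfl
  | cons x t ih =>
    intro acc
    cases acc with
    | none =>
      simp only [List.map_cons, List.foldl_cons, minStep, Option.map_none]
      exact ih (some x)
    | some a =>
      simp only [List.map_cons, List.foldl_cons, minStep, Option.map_some, h]
      by_cases hx : la x a = true
      · rw [if_pos hx, if_pos hx]; exact ih (some x)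
      · rw [if_neg hx, if_neg hx]; exact ih (some a)

-- key comparisons -----------------------------------------------------------------------------

theorem keyLt_two_two (r s : Int × Int × Int × String) :
    keyLt (2, r.1, r.2.1, r.2.2.1, r.2.2.2) (2, s.1, s.2.1, s.2.2.1, s.2.2.2) = rankLt r s := by
  simp [keyLt, rankLt]

theorem keyLt_zero_lt (k : Int × Int × Int × Int × String)
    (h : k = (1, 0, 0, 0, "") ∨ k.1 = 2) :
    keyLt (0, 0, 0, 0, "") k = true := by
  rcases h with h | h
  · subst h; simp [keyLt]
  · simp [keyLt, h]

theorem keyLt_one_two (k : Int × Int × Int × Int × String) (h : k.1 = 2) :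
    keyLt (1, 0, 0, 0, "") k = true := by
  simp [keyLt, h]

theorem keyLt_to_zero (k : Int × Int × Int × Int × String)
    (h : k = (0, 0, 0, 0, "") ∨ k.1 = 1 ∨ k.1 = 2) :
    keyLt k (0, 0, 0, 0, "") = false := by
  rcases h with h | h | h
  · subst h; simp [keyLt]
  · simp [keyLt, h]
  · simp [keyLt, h]

theorem keyLt_to_one (k : Int × Int × Int × Int × String)
    (h : k = (1, 0, 0, 0, "") ∨ k.1 = 2) :
    keyLt k (1, 0, 0, 0, "") = false := by
  rcases h with h | h
  · subst h; simp [keyLt]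
  · simp [keyLt, h]

-- shape of scored entries ---------------------------------------------------------------------

theorem mem_scored_shape (pref pl : String) (l : List String) (k : Int × Int × Int × Int × String)
    (v : String) (hmem : (k, v) ∈ l.filterMap (fun mid => keyOf pref pl mid)) :
    (k = (0, 0, 0, 0, "") ∧ v = pref) ∨ k = (1, 0, 0, 0, "") ∨ k.1 = 2 := by
  rcases List.mem_filterMap.mp hmem with ⟨mid, _hmid, hk⟩
  unfold keyOf at hk
  by_cases h0 : (mid == pref) = true
  · simp only [h0, if_true] at hk
    exact Or.inl ⟨(Prod.mk.injEq _ _ _ _ ▸ Option.some.injEq _ _ ▸ hk).1.symm ▸ rfl, by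
      cases hk; exact (eq_of_beq h0)⟩
  · simp only [h0, if_false] at hk
    by_cases h1 : (PySem.Str.lower mid == pl) = true
    · simp only [h1, if_true] at hk
      cases hk; exact Or.inr (Or.inl rfl)
    · simp only [h1, if_false] at hk
      by_cases h2 : PySem.Str.isIn pl (PySem.Str.lower mid) = true
      · simp only [h2, if_true] at hk
        cases hk; exact Or.inr (Or.inr rfl)
      · simp only [h2, if_false] at hk; exact absurd hk (by simp)

theorem mem_scored_shape_no_exact (pref pl : String) (l : List String)
    (hne : ∀ mid ∈ l, (mid == pref) = false)
    (k : Int × Int × Int × Int × String) (v : String)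
    (hmem : (k, v) ∈ l.filterMap (fun mid => keyOf pref pl mid)) :
    k = (1, 0, 0, 0, "") ∨ k.1 = 2 := by
  rcases List.mem_filterMap.mp hmem with ⟨mid, hmid, hk⟩
  unfold keyOf at hk
  simp only [hne mid hmid, if_false] at hk
  by_cases h1 : (PySem.Str.lower mid == pl) = true
  · simp only [h1, if_true] at hk; cases hk; exact Or.inl rfl
  · simp only [h1, if_false] at hk
    by_cases h2 : PySem.Str.isIn pl (PySem.Str.lower mid) = true
    · simp only [h2, if_true] at hk; cases hk; exact Or.inr rfl
    · simp only [h2, if_false] at hk; exact absurd hk (by simp)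

-- scored of a list with no exact and no case-insensitive hit = the wrapped substring hits
theorem scored_no_hits (pref pl : String) :
    ∀ l : List String, (∀ mid ∈ l, (mid == pref) = false) →
      (∀ mid ∈ l, (PySem.Str.lower mid == pl) = false) →
      l.filterMap (fun mid => keyOf pref pl mid) =
        (l.filter (fun mid => PySem.Str.isIn pl (PySem.Str.lower mid))).map
          (fun mid => (((2 : Int), (rank4 mid).1, (rank4 mid).2.1, (rank4 mid).2.2.1,
            (rank4 mid).2.2.2), mid)) := by
  intro l
  induction l with
  | nil => intro _ _; rfl
  | cons x t ih =>
    intro h0 h1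
    have hx0 := h0 x (by simp)
    have hx1 := h1 x (by simp)
    simp only [List.filterMap_cons, List.filter_cons]
    rw [ih (fun m hm => h0 m (by simp [hm])) (fun m hm => h1 m (by simp [hm]))]
    unfold keyOf
    simp only [hx0, hx1, if_false]
    by_cases h2 : PySem.Str.isIn pl (PySem.Str.lower x) = true <;>
      simp [PySem.Str.isIn] at h2 <;> simp [h2]

-- first occurrence splits ---------------------------------------------------------------------

theorem first_mem_split (a : String) :
    ∀ l : List String, a ∈ l →
      ∃ l1 l2, l = l1 ++ a :: l2 ∧ ∀ y ∈ l1, (y == a) = false := by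
  intro l
  induction l with
  | nil => intro h; exact absurd h (List.not_mem_nil)
  | cons x t ih =>
    intro h
    by_cases hx : (x == a) = true
    · exact ⟨[], t, by simp [eq_of_beq hx], by simp⟩
    · have : a ∈ t := by
        rcases List.mem_cons.mp h with h | h
        · exact absurd (by simp [h]) hx
        · exact h
      rcases ih this with ⟨l1, l2, heq, hall⟩
      exact ⟨x :: l1, l2, by simp [heq], by
        intro y hy
        rcases List.mem_cons.mp hy with h | h
        · subst h; simpa using hx
        · exact hall y h⟩

theorem find?_some_split (p : String → Bool) :
    ∀ (l : List String) (m : String), l.find? p = some m →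
      p m = true ∧ ∃ l1 l2, l = l1 ++ m :: l2 ∧ ∀ y ∈ l1, p y = false := by
  intro l
  induction l with
  | nil => intro m h; exact absurd h (by simp)
  | cons x t ih =>
    intro m h
    by_cases hx : p x = true
    · rw [List.find?_cons_of_pos hx] at h
      cases h
      exact ⟨hx, [], t, rfl, by simp⟩
    · rw [List.find?_cons_of_neg (by simpa using hx)] at h
      rcases ih m h with ⟨hp, l1, l2, heq, hall⟩
      refine ⟨hp, x :: l1, l2, by simp [heq], ?_⟩
      intro y hy
      rcases List.mem_cons.mp hy with h' | h'
      · subst h'; simpa using hx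
      · exact hall y h'

-- min(xs, key) is the head of sorted(xs, key): same first-minimal tie-break ------------------

theorem head?_insertBy {α : Type} (before : α → α → Bool) (x : α) (acc : List α) :
    (PySem.List.insertBy before x acc).head? =
      some (match acc.head? with
            | none => x
            | some h => if before x h then x else h) := by
  cases acc with
  | nil => simp [PySem.List.insertBy]
  | cons h t =>
    by_cases hb : before x h = true <;> simp [PySem.List.insertBy, hb]

theorem head?_foldl_insertBy {α : Type} (before : α → α → Bool) :
    ∀ (l : List α) (acc : List α),
    (l.foldl (fun acc x => PySem.List.insertBy before x acc) acc).head? =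
      l.foldl (minStep before) acc.head? := by
  intro l
  induction l with
  | nil => intro acc; simp
  | cons x t ih =>
    intro acc
    simp only [List.foldl_cons, ih, head?_insertBy, minStep]
    cases acc with
    | nil => simp
    | cons h r =>
      by_cases hb : before x h = true <;> simp [hb]

theorem length_insertBy {α : Type} (before : α → α → Bool) (x : α) :
    ∀ l : List α, (PySem.List.insertBy before x l).length = l.length + 1 := by
  intro l
  induction l with
  | nil => simp [PySem.List.insertBy]
  | cons h t ih =>
    by_cases hb : before x h = true <;> simp [PySem.List.insertBy, hb, ih]

theorem foldl_insertBy_ne_nil {α : Type} (before : α → α → Bool) :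
    ∀ (l : List α) (acc : List α), l ≠ [] →
      l.foldl (fun acc x => PySem.List.insertBy before x acc) acc ≠ [] := by
  intro l
  induction l with
  | nil => intro acc h; exact absurd rfl h
  | cons x t ih =>
    intro acc _ h0
    cases ht : t with
    | nil =>
      rw [ht] at h0
      simp only [List.foldl_cons, List.foldl_nil] at h0
      have := length_insertBy before x acc
      rw [h0] at this
      simp at this
    | cons y s =>
      rw [List.foldl_cons] at h0
      exact absurd h0 (ih _ (by simp [ht]))

-- ===== VERDICT (by name: the statement is the Claim_ definition above) =====
theorem pick_model_id_py_spec : Claim_equal_pick_model_id_py := by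
  intro preferred discovered _hdom hpre
  obtain ⟨hne, hany⟩ := hpre
  unfold Spec_pick_model_id_py pick_model_id_py pick_model_id_py_alt
  simp only []
  rw [if_neg hne, if_neg hne]
  set pref := PySem.Str.strip preferred with hpref
  set pl := PySem.Str.lower pref with hpl
  by_cases hc : discovered.contains pref = true
  · -- exact match: A returns pref; B's global min is the first tier-0 entry, value pref
    rw [if_pos hc]
    rcases first_mem_split pref discovered (List.contains_iff_mem.mp hc) with ⟨d1, d2, heq, h1⟩
    have hk : keyOf pref pl pref = some ((0, 0, 0, 0, ""), pref) := by
      unfold keyOf; simp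
    rw [heq, List.filterMap_append, List.filterMap_cons, hk]
    rw [foldl_minStep_split _ _ _ (((0 : Int), (0 : Int), (0 : Int), (0 : Int), ""), pref)]
    · intro y hy
      rcases y with ⟨k, v⟩
      exact keyLt_zero_lt k (mem_scored_shape_no_exact pref pl d1 h1 k v hy)
    · simp [keyLt]
    · intro y hy
      rcases y with ⟨k, v⟩
      exact keyLt_to_zero k (by
        rcases mem_scored_shape pref pl d2 k v hy with ⟨h, _⟩ | h | h
        · exact Or.inl h
        · exact Or.inr (Or.inl (by rw [h]))
        · exact Or.inr (Or.inr h))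
  · -- no exact match anywhere
    rw [if_neg hc]
    have hne_all : ∀ mid ∈ discovered, (mid == pref) = false := by
      intro mid hm
      cases hbeq : (mid == pref) with
      | false => rfl
      | true => exact absurd (List.contains_iff_mem.mpr (eq_of_beq hbeq ▸ hm)) hc
    cases hf : discovered.find? (fun mid => PySem.Str.lower mid == pl) with
    | some m =>
      -- case-insensitive match: A returns the first hit m; so does B's min (tier 1, first)
      rcases find?_some_split _ discovered m hf with ⟨hpm, d1, d2, heq, hall⟩
      have hm_mem : m ∈ discovered := heq ▸ (by simp)
      have hk : keyOf pref pl m = some ((1, 0, 0, 0, ""), m) := by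
        have hpm' : (PySem.Str.lower m == pl) = true := by simpa using hpm
        unfold keyOf
        simp [hne_all m hm_mem, hpm']
      rw [heq, List.filterMap_append, List.filterMap_cons, hk]
      have h1e : ∀ mid ∈ d1, (mid == pref) = false := by
        intro mid hm'; exact hne_all mid (heq ▸ (by simp [hm']))
      have h2e : ∀ mid ∈ d2, (mid == pref) = false := by
        intro mid hm'; exact hne_all mid (heq ▸ (by simp [hm']))
      rw [foldl_minStep_split _ _ _ (((1 : Int), (0 : Int), (0 : Int), (0 : Int), ""), m)]
      · intro y hy
        rcases y with ⟨k, v⟩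
        rw [scored_no_hits pref pl d1 h1e hall] at hy
        rcases List.mem_map.mp hy with ⟨mid, _, hw⟩
        cases hw
        exact keyLt_one_two _ rfl
      · simp [keyLt]
      · intro y hy
        rcases y with ⟨k, v⟩
        exact keyLt_to_one k (mem_scored_shape_no_exact pref pl d2 h2e k v hy)
    | none =>
      -- substring stage: A's sorted[0] = B's min over the wrapped substring hits
      have hci_all : ∀ mid ∈ discovered, (PySem.Str.lower mid == pl) = false := by
        intro mid hm
        have := List.find?_eq_none.mp hf mid hm
        simpa using this
      rw [scored_no_hits pref pl discovered hne_all hci_all]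
      have hfilter_ne : discovered.filter (fun mid => PySem.Str.isIn pl (PySem.Str.lower mid)) ≠ [] := by
        rcases List.any_eq_true.mp hany with ⟨mid, hmem, hin⟩
        intro h0
        have : mid ∈ discovered.filter (fun mid => PySem.Str.isIn pl (PySem.Str.lower mid)) :=
          List.mem_filter.mpr ⟨hmem, hin⟩
        rw [h0] at this
        exact absurd this (List.not_mem_nil)
      have hmap := foldl_minStep_map
        (fun mid => (((2 : Int), (rank4 mid).1, (rank4 mid).2.1, (rank4 mid).2.2.1,
          (rank4 mid).2.2.2), mid))
        (fun a b => rankLt (rank4 a) (rank4 b))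
        (fun a b => keyLt a.1 b.1)
        (fun a b => keyLt_two_two (rank4 a) (rank4 b))
        (discovered.filter (fun mid => PySem.Str.isIn pl (PySem.Str.lower mid))) none
      simp only [Option.map_none] at hmap
      rw [hmap]
      have hhead := head?_foldl_insertBy (fun a b => rankLt (rank4 a) (rank4 b))
        (discovered.filter (fun mid => PySem.Str.isIn pl (PySem.Str.lower mid))) []
      simp only [List.head?_nil] at hhead
      cases hmin : (discovered.filter (fun mid => PySem.Str.isIn pl (PySem.Str.lower mid))).foldl
          (minStep (fun a b => rankLt (rank4 a) (rank4 b))) none with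
      | none => exact absurd hmin (foldl_minStep_ne_none _ _ hfilter_ne)
      | some m =>
        rw [hmin] at hhead
        cases hs : (discovered.filter (fun mid => PySem.Str.isIn pl (PySem.Str.lower mid))).foldl
            (fun acc x => PySem.List.insertBy (fun a b => rankLt (rank4 a) (rank4 b)) x acc) [] with
        | nil => exact absurd hs (foldl_insertBy_ne_nil _ _ _ hfilter_ne)
        | cons m' t =>
          rw [hs] at hhead
          simp only [List.head?_cons] at hhead
          cases hhead
          rfl
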